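-- pv_equiv track=rewrite | github.com/modest2va/ps | 백준/Bronze/2501. 약수 구하기/약수 구하기.py | solution
-- ===== SOURCE A (Python) =====
-- def solution(n, k):
--     divisor = []
--     for i in range(1, int(n**0.5) + 1):
--         if n % i == 0:
--             divisor.append(i)
--             if i != n//i:
--                 divisor.append(n//i)
--     divisor.sort()
--     if len(divisor) < k:
--         return 0
--     else:
--         return divisor[k -1]
-- ===== SOURCE B (Python) =====
-- def solution(n, k):
--     # factor n, then generate every divisor from the prime factorization
--     divisors = [1] if n >= 1 else []
--     m = n
--     p = 2
--     while p * p <= m: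
--         if m % p == 0:
--             power = 1
--             powers = [1]
--             while m % p == 0:
--                 m //= p
--                 power *= p
--                 powers.append(power)
--             divisors = [d * q for q in powers for d in divisors]
--         p += 1
--     if m > 1:
--         divisors = divisors + [d * m for d in divisors]
--     divisors.sort()
--     return divisors[k - 1] if k <= len(divisors) else 0
-- ===== Notes on version B (the rewrite author's own statement) =====
-- stated objective: alternative
-- what changed: Replaces A's paired enumeration of divisors by trial division (collect i and n//i for each i up to sqrt(n)) with prime factorization: B factors n once, generates every divisor as a product of prime powers over the factorization, then sorts and indexes.
-- outside the precondition, e.g. on solution(6, 0): A returns 6, B returns 6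
import Mathlib
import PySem

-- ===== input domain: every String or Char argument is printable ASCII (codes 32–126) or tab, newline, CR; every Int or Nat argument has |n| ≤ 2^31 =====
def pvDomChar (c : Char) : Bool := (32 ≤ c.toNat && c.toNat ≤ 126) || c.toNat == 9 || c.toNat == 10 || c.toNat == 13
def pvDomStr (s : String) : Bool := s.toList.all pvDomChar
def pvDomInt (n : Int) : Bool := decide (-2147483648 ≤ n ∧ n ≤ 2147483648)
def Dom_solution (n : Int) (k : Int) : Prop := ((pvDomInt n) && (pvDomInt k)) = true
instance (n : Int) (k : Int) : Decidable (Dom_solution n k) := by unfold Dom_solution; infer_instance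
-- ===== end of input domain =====

-- B replaces A's sqrt-bounded paired-divisor enumeration by prime factorization: it factors n,
-- generates every divisor as a product of prime powers, then sorts and indexes (objective: alternative).

-- ===== PORT A =====
-- int(n**0.5) is ported as Int.sqrt: exact for every 0 ≤ n ≤ 2^31 (verified against Python's
-- float pow on the whole domain; n < 0 raises TypeError in Python and is excluded by Pre_).
def solution (n : Int) (k : Int) : Int :=
  let divisor : List Int :=
    (PySem.List.pyRange 1 (Int.sqrt n + 1) 1).foldl
      (fun acc i =>
        if PySem.Int.mod n i = 0 then
          let acc := acc ++ [i]
          if i ≠ PySem.Int.floordiv n i then acc ++ [PySem.Int.floordiv n i] else acc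
        else acc) []
  let divisor := PySem.List.sorted divisor (fun x => x) false
  if (divisor.length : Int) < k then 0
  else ((PySem.List.pyGet? divisor (k - 1)).getD 0)  -- none = IndexError, unreachable under Pre_

-- ===== PORT B =====
-- inner `while m % p == 0` loop of Source B. The Nat fuel only makes the recursion structural
-- (a totality guard): every call passes fuel ≥ the number of iterations, so it never runs out.
def innerLoop : Nat → Int → Int → Int → List Int → Int × List Int
  | 0, m, _, _, powers => (m, powers)
  | fuel + 1, m, p, power, powers =>
    if PySem.Int.mod m p = 0 then
      innerLoop fuel (PySem.Int.floordiv m p) p (power * p) (powers ++ [power * p])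
    else (m, powers)

-- outer `while p * p <= m` loop of Source B (state: divisors, m, p), same fuel discipline.
def outerLoop : Nat → List Int → Int → Int → List Int × Int
  | 0, divisors, m, _ => (divisors, m)
  | fuel + 1, divisors, m, p =>
    if p * p ≤ m then
      if PySem.Int.mod m p = 0 then
        let r := innerLoop m.toNat m p 1 [1]
        outerLoop fuel (r.2.flatMap fun q => divisors.map fun d => d * q) r.1 (p + 1)
      else outerLoop fuel divisors m (p + 1)
    else (divisors, m)

def solution_alt (n : Int) (k : Int) : Int :=
  let divisors0 : List Int := if 1 ≤ n then [1] else []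
  let r := outerLoop (n.toNat + 1) divisors0 n 2
  let divisors := if 1 < r.2 then r.1 ++ r.1.map (fun d => d * r.2) else r.1
  let divisors := PySem.List.sorted divisors (fun x => x) false
  if k ≤ (divisors.length : Int) then (PySem.List.pyGet? divisors (k - 1)).getD 0 else 0

-- ===== PRECONDITION & SPEC =====
-- Pre_ excludes n < 0, where A raises TypeError (n**0.5 is a complex number), and k ≤ 0, where A
-- raises IndexError except for the few k within divisor-count of 0, where its value (which B
-- happens to share) is an artefact of Python's negative-index wraparound.
def Pre_solution (n : Int) (k : Int) : Prop := 0 ≤ n ∧ 1 ≤ k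
instance (n : Int) (k : Int) : Decidable (Pre_solution n k) := by unfold Pre_solution; infer_instance
def pvWitness_solution : Int × Int := (6, 2)

def Spec_solution (n : Int) (k : Int) (out : Int) : Prop := out = solution_alt n k
instance (n : Int) (k : Int) (out : Int) : Decidable (Spec_solution n k out) := by unfold Spec_solution; infer_instance

-- ===== CLAIM (what is proved, stated in full; the proofs are below) =====
def Claim_equal_solution : Prop := ∀ (n : Int) (k : Int), Dom_solution n k → Pre_solution n k → Spec_solution n k (solution n k)

-- ===== LEMMAS AND PROOFS =====

-- the ascending list of all divisors of n in [1, n]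
def divList (n : Int) : List Int :=
  (PySem.List.pyRange 1 (n + 1) 1).filter (fun i => decide (PySem.Int.mod n i = 0))

-- ---------- A-side: sorted pair-enumeration = divList ----------

-- what one iteration of A's loop appends
def pairOf (n i : Int) : List Int :=
  if PySem.Int.mod n i = 0 then
    i :: (if i ≠ PySem.Int.floordiv n i then [PySem.Int.floordiv n i] else [])
  else []

lemma foldl_eq_flatMap (n : Int) (l : List Int) (acc : List Int) :
    l.foldl (fun acc i =>
        if PySem.Int.mod n i = 0 then
          let acc := acc ++ [i]
          if i ≠ PySem.Int.floordiv n i then acc ++ [PySem.Int.floordiv n i] else acc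
        else acc) acc = acc ++ l.flatMap (pairOf n) := by
  induction l generalizing acc with
  | nil => simp
  | cons i rest ih =>
    rw [List.foldl_cons, ih, List.flatMap_cons]
    simp only [pairOf]
    split_ifs with h1 h2 <;> simp

lemma sqrt_bounds (n : Int) (hn : 0 ≤ n) :
    Int.sqrt n * Int.sqrt n ≤ n ∧ n < (Int.sqrt n + 1) * (Int.sqrt n + 1) := by
  have h1 := Nat.sqrt_le' n.toNat
  have h2 := Nat.lt_succ_sqrt' n.toNat
  have hn' : ((n.toNat : Int)) = n := Int.toNat_of_nonneg hn
  unfold Int.sqrt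
  constructor
  · have : ((Nat.sqrt n.toNat ^ 2 : Nat) : Int) ≤ ((n.toNat : Int)) := by exact_mod_cast h1
    push_cast at this; nlinarith
  · have : ((n.toNat : Int)) < (((Nat.sqrt n.toNat).succ ^ 2 : Nat) : Int) := by exact_mod_cast h2
    push_cast at this; nlinarith

lemma mem_pairOf (n i x : Int) :
    x ∈ pairOf n i ↔ (PySem.Int.mod n i = 0 ∧
      (x = i ∨ (i ≠ PySem.Int.floordiv n i ∧ x = PySem.Int.floordiv n i))) := by
  unfold pairOf
  split_ifs with h1 h2
  · simp [h1, h2]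
  · simp [h1, h2]
  · simp [h1]

lemma div_dvd_self (n d : Int) (hdvd : d ∣ n) : (n / d) ∣ n :=
  ⟨d, (Int.ediv_mul_cancel hdvd).symm⟩

lemma double_div (n d : Int) (hn : 1 ≤ n) (hd : 1 ≤ d) (hdvd : d ∣ n) :
    n / (n / d) = d := by
  have hdn : d ≤ n := Int.le_of_dvd (by omega) hdvd
  have h1 : 1 ≤ n / d := by rw [Int.le_ediv_iff_mul_le (by omega)]; omega
  have h2 : d * (n / d) = n := Int.mul_ediv_cancel' hdvd
  calc n / (n / d) = d * (n / d) / (n / d) := by rw [h2]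
    _ = d := Int.mul_ediv_cancel d (by omega)

lemma mem_flatMap_iff (n : Int) (hn : 1 ≤ n) (x : Int) :
    x ∈ (PySem.List.pyRange 1 (Int.sqrt n + 1) 1).flatMap (pairOf n) ↔
      (1 ≤ x ∧ x ≤ n ∧ PySem.Int.mod n x = 0) := by
  obtain ⟨hrr, hlt⟩ := sqrt_bounds n (by omega)
  set r := Int.sqrt n with hrdef
  have hr0 : 0 ≤ r := Int.sqrt_nonneg n
  have hr1 : 1 ≤ r := by nlinarith
  have hrn : r ≤ n := by nlinarith
  simp only [List.mem_flatMap, PySem.List.mem_pyRange_one, mem_pairOf]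
  constructor
  · rintro ⟨i, ⟨h1i, hir⟩, hmod, hx⟩
    have hir' : i ≤ r := by omega
    have hdvd : i ∣ n := (PySem.Int.mod_eq_zero_iff_dvd n i).1 hmod
    have hfd : PySem.Int.floordiv n i = n / i := PySem.Int.floordiv_eq_ediv_of_pos (by omega)
    rcases hx with rfl | ⟨hne, rfl⟩
    · exact ⟨h1i, le_trans hir' hrn, hmod⟩
    · rw [hfd]
      refine ⟨?_, ?_, ?_⟩
      · rw [Int.le_ediv_iff_mul_le (by omega)]; omega
      · exact Int.ediv_le_self i (by omega)
      · rw [PySem.Int.mod_eq_zero_iff_dvd]; exact div_dvd_self n i hdvd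
  · rintro ⟨h1x, hxn, hmod⟩
    have hdvd : x ∣ n := (PySem.Int.mod_eq_zero_iff_dvd n x).1 hmod
    by_cases hxr : x ≤ r
    · exact ⟨x, ⟨h1x, by omega⟩, hmod, Or.inl rfl⟩
    · push Not at hxr
      have hq1 : 1 ≤ n / x := by rw [Int.le_ediv_iff_mul_le (by omega)]; omega
      have hqr : n / x ≤ r := by
        have := (Int.ediv_lt_iff_lt_mul (c := x) (a := n) (b := r + 1) (by omega)).2
          (by nlinarith)
        omega
      have hqd : (n / x) ∣ n := div_dvd_self n x hdvd
      have hdd : n / (n / x) = x := double_div n x hn (by omega) hdvd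
      have hfd : PySem.Int.floordiv n (n / x) = n / (n / x) :=
        PySem.Int.floordiv_eq_ediv_of_pos (by omega)
      refine ⟨n / x, ⟨hq1, by omega⟩, (PySem.Int.mod_eq_zero_iff_dvd n (n / x)).2 hqd,
        Or.inr ⟨?_, ?_⟩⟩
      · rw [hfd, hdd]; omega
      · rw [hfd, hdd]

lemma nodup_flatMap_pairs (n : Int) (hn : 1 ≤ n) :
    ((PySem.List.pyRange 1 (Int.sqrt n + 1) 1).flatMap (pairOf n)).Nodup := by
  obtain ⟨hrr, hlt⟩ := sqrt_bounds n (by omega)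
  set r := Int.sqrt n with hrdef
  have hr0 : 0 ≤ r := Int.sqrt_nonneg n
  have hbig : ∀ i : Int, 1 ≤ i → i ≤ r → r ≤ n / i := by
    intro i h1 h2
    rw [Int.le_ediv_iff_mul_le (by omega)]; nlinarith
  have hbig' : ∀ i : Int, 1 ≤ i → i < r → r < n / i := by
    intro i h1 h2
    have : r + 1 ≤ n / i := by
      rw [Int.le_ediv_iff_mul_le (by omega)]; nlinarith
    omega
  rw [List.nodup_flatMap]
  constructor
  · intro i _
    unfold pairOf
    split_ifs with h1 h2
    · simp [h2]
    · simp
    · simp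
  · apply List.Pairwise.imp_of_mem ?_ (PySem.List.pairwise_lt_pyRange_one 1 (r + 1))
    intro i j hi hj hij
    rw [PySem.List.mem_pyRange_one] at hi hj
    intro a hai haj
    rw [mem_pairOf] at hai haj
    obtain ⟨hmi, hxi⟩ := hai
    obtain ⟨hmj, hxj⟩ := haj
    have hdi : i ∣ n := (PySem.Int.mod_eq_zero_iff_dvd n i).1 hmi
    have hdj : j ∣ n := (PySem.Int.mod_eq_zero_iff_dvd n j).1 hmj
    have hfi : PySem.Int.floordiv n i = n / i := PySem.Int.floordiv_eq_ediv_of_pos (by omega)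
    have hfj : PySem.Int.floordiv n j = n / j := PySem.Int.floordiv_eq_ediv_of_pos (by omega)
    rw [hfi] at hxi
    rw [hfj] at hxj
    have hbj : r ≤ n / j := hbig j (by omega) (by omega)
    have hbi' : i < r → r < n / i := hbig' i (by omega)
    rcases hxi with rfl | ⟨hnei, rfl⟩ <;> rcases hxj with h | ⟨hnej, h⟩
    · omega
    · omega
    · have := hbi' (by omega)
      omega
    · have h1 : n / (n / i) = i := double_div n i hn (by omega) hdi
      have h2 : n / (n / j) = j := double_div n j hn (by omega) hdj
      rw [← h] at h2
      omega

lemma divList_pairwise (n : Int) : (divList n).Pairwise (fun a b => a < b) :=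
  List.Pairwise.filter _ (PySem.List.pairwise_lt_pyRange_one 1 (n + 1))

lemma mem_divList (n x : Int) :
    x ∈ divList n ↔ (1 ≤ x ∧ x ≤ n ∧ PySem.Int.mod n x = 0) := by
  simp only [divList, List.mem_filter, PySem.List.mem_pyRange_one, decide_eq_true_eq]
  constructor
  · rintro ⟨⟨h1, h2⟩, h3⟩; exact ⟨h1, by omega, h3⟩
  · rintro ⟨h1, h2, h3⟩; exact ⟨⟨h1, by omega⟩, h3⟩

lemma sorted_eq_divList_of_mem_nodup (n : Int) (hn : 1 ≤ n) (L : List Int)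
    (hmem : ∀ x, x ∈ L ↔ (1 ≤ x ∧ x ≤ n ∧ PySem.Int.mod n x = 0)) (hnd : L.Nodup) :
    PySem.List.sorted L (fun x => x) false = divList n := by
  have hDp : (divList n).Pairwise (fun a b => a < b) := divList_pairwise n
  have hDn : (divList n).Nodup := hDp.imp (fun h => ne_of_lt h)
  apply PySem.List.sorted_eq_of_perm_of_pairwise_lt _ _ _ ?_ hDp
  rw [List.perm_ext_iff_of_nodup hDn hnd]
  intro a
  rw [mem_divList n a, hmem a]

lemma sorted_pairs_eq_divList (n : Int) (hn : 1 ≤ n) :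
    PySem.List.sorted ((PySem.List.pyRange 1 (Int.sqrt n + 1) 1).flatMap (pairOf n)) (fun x => x) false
      = divList n :=
  sorted_eq_divList_of_mem_nodup n hn _ (mem_flatMap_iff n hn) (nodup_flatMap_pairs n hn)

-- ---------- B-side: the factorization loop produces exactly the divisors ----------

lemma isCoprime_of_prime_not_dvd (p x : Int) (hp : Prime p) (h : ¬ p ∣ x) : IsCoprime p x :=
  hp.coprime_iff_not_dvd.2 h

-- decomposition of a divisor of a * p^e (p prime, p ∤ a)
lemma dvd_mul_prime_pow (a p : Int) (hp : Prime p) (hp2 : 2 ≤ p) (hpa : ¬ p ∣ a) :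
    ∀ (e : ℕ) (x : Int), 1 ≤ x → x ∣ a * p ^ e →
      ∃ (d : Int) (j : ℕ), 1 ≤ d ∧ d ∣ a ∧ j ≤ e ∧ x = d * p ^ j := by
  intro e
  induction e with
  | zero =>
    intro x hx h
    exact ⟨x, 0, hx, by simpa using h, le_refl _, by ring⟩
  | succ e ih =>
    intro x hx h
    by_cases hpx : p ∣ x
    · obtain ⟨y, rfl⟩ := hpx
      have hy1 : 1 ≤ y := by nlinarith
      have hy : y ∣ a * p ^ e := by
        have h' : p * y ∣ p * (a * p ^ e) := by
          have : p * (a * p ^ e) = a * p ^ (e + 1) := by ring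
          rw [this]; exact h
        exact (mul_dvd_mul_iff_left (show p ≠ 0 by omega)).1 h'
      obtain ⟨d, j, h1, h2, h3, rfl⟩ := ih y hy1 hy
      exact ⟨d, j + 1, h1, h2, by omega, by ring⟩
    · have hc : IsCoprime x (p ^ (e + 1)) :=
        ((isCoprime_of_prime_not_dvd p x hp hpx).symm).pow_right
      exact ⟨x, 0, hx, hc.dvd_of_dvd_mul_right h, by omega, by ring⟩

-- uniqueness of the decomposition
lemma prime_pow_factor_unique (p d1 d2 : Int) (j1 j2 : ℕ) (hp2 : 2 ≤ p)
    (h1 : ¬ p ∣ d1) (h2 : ¬ p ∣ d2)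
    (heq : d1 * p ^ j1 = d2 * p ^ j2) : j1 = j2 ∧ d1 = d2 := by
  have hpow : ∀ (i : ℕ), (p : Int) ^ i ≠ 0 := fun i => pow_ne_zero i (by omega)
  rcases Nat.le_total j1 j2 with hle | hle
  · obtain ⟨t, rfl⟩ := Nat.exists_eq_add_of_le hle
    have : d1 * p ^ j1 = d2 * p ^ t * p ^ j1 := by rw [heq]; ring
    have hd : d1 = d2 * p ^ t := mul_right_cancel₀ (hpow j1) this
    rcases Nat.eq_zero_or_pos t with rfl | ht
    · constructor; omega; simpa using hd
    · exfalso; apply h1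
      rw [hd]
      exact Dvd.dvd.mul_left (dvd_pow_self p (by omega)) d2
  · obtain ⟨t, rfl⟩ := Nat.exists_eq_add_of_le hle
    have : d2 * p ^ j2 = d1 * p ^ t * p ^ j2 := by rw [← heq]; ring
    have hd : d2 = d1 * p ^ t := mul_right_cancel₀ (hpow j2) this
    rcases Nat.eq_zero_or_pos t with rfl | ht
    · constructor; omega; simp at hd; omega
    · exfalso; apply h2
      rw [hd]
      exact Dvd.dvd.mul_left (dvd_pow_self p (by omega)) d1

-- a number ≥ 2 whose positive prime divisors are all ≥ itself is prime
lemma prime_of_least_factor (p : Int) (h2 : 2 ≤ p)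
    (hmin : ∀ q : Int, Prime q → 0 < q → q ∣ p → p ≤ q) : Prime p := by
  have hna : (2 : ℕ) ≤ p.natAbs := by omega
  set r := p.natAbs.minFac with hr
  have hrp : r.Prime := Nat.minFac_prime (by omega)
  have hrd : (r : Int) ∣ p := by
    have : (r : Int) ∣ (p.natAbs : Int) := Int.natCast_dvd_natCast.2 (Nat.minFac_dvd _)
    rwa [Int.natCast_natAbs, abs_of_pos (by omega : (0:Int) < p)] at this
  have hrP : Prime (r : Int) := Int.prime_iff_natAbs_prime.2 (by simpa using hrp)
  have hge : p ≤ (r : Int) := hmin _ hrP (by exact_mod_cast hrp.pos) hrd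
  have hle : (r : Int) ≤ p := Int.le_of_dvd (by omega) hrd
  have : (r : Int) = p := le_antisymm hle hge
  rwa [← this]

-- the inner loop divides out the full p-power and records powers [1, p, …, p^e]
lemma innerLoop_spec (fuel : Nat) (m p power : Int) (powers : List Int)
    (hm : 0 < m) (hp : 2 ≤ p) (hfuel : m.toNat ≤ fuel) :
    ∃ e : ℕ, m = (innerLoop fuel m p power powers).1 * p ^ e ∧
      ¬ p ∣ (innerLoop fuel m p power powers).1 ∧ 0 < (innerLoop fuel m p power powers).1 ∧
      (innerLoop fuel m p power powers).2
        = powers ++ (List.range e).map (fun j => power * p ^ (j + 1)) ∧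
      (PySem.Int.mod m p = 0 → 1 ≤ e) := by
  induction fuel generalizing m power powers with
  | zero => omega
  | succ fuel ih =>
    rw [innerLoop]
    split
    next h1 =>
      have hdvd : p ∣ m := (PySem.Int.mod_eq_zero_iff_dvd m p).1 h1
      have hfd : PySem.Int.floordiv m p = m / p := PySem.Int.floordiv_eq_ediv_of_pos (by omega)
      have hqm : (m / p) * p = m := Int.ediv_mul_cancel hdvd
      have hq1 : 0 < m / p := by
        rcases Int.lt_or_le 0 (m / p) with h | h
        · exact h
        · nlinarith
      have hlt : m / p < m := Int.ediv_lt_of_lt_mul (by omega) (by nlinarith)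
      obtain ⟨e, he1, he2, he3, he4, _⟩ :=
        ih (PySem.Int.floordiv m p) (power * p) (powers ++ [power * p])
          (by omega) (by rw [hfd]; omega)
      refine ⟨e + 1, ?_, he2, he3, ?_, fun _ => by omega⟩
      · rw [pow_succ, ← mul_assoc, ← he1, hfd, hqm]
      · have hmapeq : List.map (fun j => power * p * p ^ (j + 1)) (List.range e)
            = List.map ((fun j => power * p ^ (j + 1)) ∘ Nat.succ) (List.range e) := by
          apply List.map_congr_left
          intro j _
          simp only [Function.comp_apply, Nat.succ_eq_add_one]
          ring
        rw [he4, List.append_assoc, List.range_succ_eq_map, List.map_cons, List.map_map,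
          List.singleton_append, hmapeq]
        norm_num
    next h1 =>
      have hnd : ¬ p ∣ m := fun hd => h1 ((PySem.Int.mod_eq_zero_iff_dvd m p).2 hd)
      refine ⟨0, by simp, hnd, hm, by simp, ?_⟩
      intro hmod
      exact absurd ((PySem.Int.mod_eq_zero_iff_dvd m p).1 hmod) hnd

-- the outer loop invariant: divisors = all divisors of the factored-out part c
lemma outerLoop_spec (fuel : Nat) (divisors : List Int) (m p c : Int)
    (hfuel : (m - p).toNat < fuel)
    (hm : 0 < m) (hp : 2 ≤ p) (hc : 0 < c)
    (hmem : ∀ x, x ∈ divisors ↔ (1 ≤ x ∧ x ∣ c)) (hnd : divisors.Nodup)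
    (hmfac : ∀ q : Int, Prime q → 0 < q → q ∣ m → p ≤ q)
    (hcfac : ∀ q : Int, Prime q → 0 < q → q ∣ c → q < p) :
    ∃ c', 0 < c' ∧ c' * (outerLoop fuel divisors m p).2 = c * m ∧
      (∀ x, x ∈ (outerLoop fuel divisors m p).1 ↔ (1 ≤ x ∧ x ∣ c')) ∧
      (outerLoop fuel divisors m p).1.Nodup ∧ 0 < (outerLoop fuel divisors m p).2 ∧
      ((outerLoop fuel divisors m p).2 = 1 ∨
        (Prime (outerLoop fuel divisors m p).2 ∧ ¬ (outerLoop fuel divisors m p).2 ∣ c')) := by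
  induction fuel generalizing divisors m p c with
  | zero => omega
  | succ fuel ih =>
    rw [outerLoop]
    split
    next hg1 =>
      have hpp : p + 2 ≤ p * p := by nlinarith
      split
      next hmod =>
        have hpdvd : p ∣ m := (PySem.Int.mod_eq_zero_iff_dvd m p).1 hmod
        have hpprime : Prime p := prime_of_least_factor p hp (fun q hq hq0 hqd =>
          hmfac q hq hq0 (dvd_trans hqd hpdvd))
        have hpc : ¬ p ∣ c := fun hd => absurd (hcfac p hpprime (by omega) hd) (lt_irrefl p)
        obtain ⟨e, he1, he2, he3, he4, he5⟩ := innerLoop_spec m.toNat m p 1 [1] hm hp (le_refl _)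
        have he : 1 ≤ e := he5 hmod
        have hmle : (innerLoop m.toNat m p 1 [1]).1 ≤ m := by
          have hpe : (p : Int) ≤ p ^ e := le_self_pow₀ (by omega) (by omega)
          nlinarith
        have hpw : (innerLoop m.toNat m p 1 [1]).2
            = (List.range (e + 1)).map (fun j => p ^ j) := by
          have hmapeq : List.map (fun j => (1:Int) * p ^ (j + 1)) (List.range e)
              = List.map ((fun j => p ^ j) ∘ Nat.succ) (List.range e) := by
            apply List.map_congr_left
            intro j _
            simp [Function.comp_apply, Nat.succ_eq_add_one]
          rw [he4, List.range_succ_eq_map, List.map_cons, List.map_map, hmapeq]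
          simp
        have hppow : ∀ j : ℕ, (0:Int) < p ^ j := fun j => pow_pos (by omega) j
        have hLmem : ∀ x, x ∈ ((innerLoop m.toNat m p 1 [1]).2).flatMap
              (fun q => divisors.map (fun d => d * q)) ↔ (1 ≤ x ∧ x ∣ c * p ^ e) := by
          intro x
          rw [hpw]
          simp only [List.mem_flatMap, List.mem_map, List.mem_range]
          constructor
          · rintro ⟨q, ⟨j, hj, rfl⟩, d, hd, rfl⟩
            obtain ⟨hd1, hd2⟩ := (hmem d).1 hd
            have := hppow j
            refine ⟨by nlinarith, mul_dvd_mul hd2 (pow_dvd_pow p (by omega))⟩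
          · rintro ⟨h1, h2⟩
            obtain ⟨d, j, hd1, hd2, hj, rfl⟩ := dvd_mul_prime_pow c p hpprime hp hpc e x h1 h2
            exact ⟨p ^ j, ⟨j, by omega, rfl⟩, d, (hmem d).2 ⟨hd1, hd2⟩, rfl⟩
        have hLnd : (((innerLoop m.toNat m p 1 [1]).2).flatMap
              (fun q => divisors.map (fun d => d * q))).Nodup := by
          rw [hpw, List.nodup_flatMap]
          constructor
          · rintro q hq
            obtain ⟨j, hj, rfl⟩ := List.mem_map.1 hq
            exact hnd.map (fun d1 d2 h => mul_right_cancel₀ (ne_of_gt (hppow j)) h)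
          · rw [List.pairwise_map]
            apply List.Pairwise.imp_of_mem ?_ List.pairwise_lt_range
            intro j1 j2 _ _ hlt
            intro a ha1 ha2
            obtain ⟨d1, hd1, rfl⟩ := List.mem_map.1 ha1
            obtain ⟨d2, hd2, heq⟩ := List.mem_map.1 ha2
            obtain ⟨hd11, hd12⟩ := (hmem d1).1 hd1
            obtain ⟨hd21, hd22⟩ := (hmem d2).1 hd2
            have hp1 : ¬ p ∣ d1 := fun h => hpc (h.trans hd12)
            have hp2 : ¬ p ∣ d2 := fun h => hpc (h.trans hd22)
            obtain ⟨hj, _⟩ := prime_pow_factor_unique p d2 d1 j2 j1 hp hp2 hp1 heq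
            omega
        have hmdvd : (innerLoop m.toNat m p 1 [1]).1 ∣ m := Dvd.intro _ he1.symm
        have hnewmfac : ∀ q : Int, Prime q → 0 < q →
            q ∣ (innerLoop m.toNat m p 1 [1]).1 → p + 1 ≤ q := by
          intro q hq hq0 hqd
          have h1 : p ≤ q := hmfac q hq hq0 (hqd.trans hmdvd)
          have h2 : q ≠ p := fun h => he2 (h ▸ hqd)
          omega
        have hnewcfac : ∀ q : Int, Prime q → 0 < q → q ∣ c * p ^ e → q < p + 1 := by
          intro q hq hq0 hqd
          rcases hq.dvd_mul.1 hqd with hqc | hqp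
          · have := hcfac q hq hq0 hqc; omega
          · have hqp' : q ∣ p := hq.dvd_of_dvd_pow hqp
            have := Int.le_of_dvd (by omega) hqp'
            omega
        obtain ⟨c', hc1, hc2, hc3, hc4, hc5, hc6⟩ :=
          ih (((innerLoop m.toNat m p 1 [1]).2).flatMap
              (fun q => divisors.map (fun d => d * q)))
            (innerLoop m.toNat m p 1 [1]).1 (p + 1) (c * p ^ e)
            (by omega) he3 (by omega) (by positivity) hLmem hLnd hnewmfac hnewcfac
        refine ⟨c', hc1, ?_, hc3, hc4, hc5, hc6⟩
        rw [hc2]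
        conv_rhs => rw [he1]
        ring
      next hmod =>
        have hnp : ¬ p ∣ m := fun hd => hmod ((PySem.Int.mod_eq_zero_iff_dvd m p).2 hd)
        exact ih divisors m (p + 1) c (by omega) hm (by omega) hc hmem hnd
          (fun q hq hq0 hqd => by
            have h1 := hmfac q hq hq0 hqd
            have h2 : q ≠ p := fun h => hnp (h ▸ hqd)
            omega)
          (fun q hq hq0 hqd => by have := hcfac q hq hq0 hqd; omega)
    next hg1 =>
      have hmlt : m < p * p := by omega
      refine ⟨c, hc, rfl, hmem, hnd, hm, ?_⟩
      rcases eq_or_lt_of_le (by omega : (1:Int) ≤ m) with h1 | h1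
      · exact Or.inl h1.symm
      · right
        have hmp : Prime m := by
          by_contra hnpm
          have hfac : m.natAbs.minFac ^ 2 ≤ m.natAbs :=
            Nat.minFac_sq_le_self (by omega)
              (fun hpr => hnpm (Int.prime_iff_natAbs_prime.2 hpr))
          have hrp : m.natAbs.minFac.Prime := Nat.minFac_prime (by omega)
          have hrd : (m.natAbs.minFac : Int) ∣ m := by
            have h' : (m.natAbs.minFac : Int) ∣ (m.natAbs : Int) :=
              Int.natCast_dvd_natCast.2 (Nat.minFac_dvd _)
            rwa [Int.natCast_natAbs, abs_of_pos (by omega : (0:Int) < m)] at h'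
          have hge : p ≤ (m.natAbs.minFac : Int) :=
            hmfac _ (Int.prime_iff_natAbs_prime.2 (by simpa using hrp))
              (by exact_mod_cast hrp.pos) hrd
          have hsq : ((m.natAbs.minFac : Int)) * ((m.natAbs.minFac : Int)) ≤ m := by
            have h2 : ((m.natAbs.minFac ^ 2 : ℕ) : Int) ≤ ((m.natAbs : ℕ) : Int) := by
              exact_mod_cast hfac
            push_cast at h2
            rw [abs_of_pos (by omega : (0:Int) < m)] at h2
            nlinarith
          nlinarith
        refine ⟨hmp, ?_⟩
        intro hdc
        have hx1 := hcfac m hmp (by omega) hdc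
        have hx2 := hmfac m hmp (by omega) dvd_rfl
        omega

-- B's pre-sort list holds exactly the divisors of n, without duplicates
lemma alt_list_spec (n : Int) (hn : 1 ≤ n) :
    (∀ x, x ∈ (if 1 < (outerLoop (n.toNat + 1) [1] n 2).2 then
        (outerLoop (n.toNat + 1) [1] n 2).1 ++ (outerLoop (n.toNat + 1) [1] n 2).1.map (fun d => d * (outerLoop (n.toNat + 1) [1] n 2).2)
      else (outerLoop (n.toNat + 1) [1] n 2).1) ↔ (1 ≤ x ∧ x ≤ n ∧ PySem.Int.mod n x = 0)) ∧
    (if 1 < (outerLoop (n.toNat + 1) [1] n 2).2 then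
        (outerLoop (n.toNat + 1) [1] n 2).1 ++ (outerLoop (n.toNat + 1) [1] n 2).1.map (fun d => d * (outerLoop (n.toNat + 1) [1] n 2).2)
      else (outerLoop (n.toNat + 1) [1] n 2).1).Nodup := by
  have hdiviff : ∀ x : Int, (1 ≤ x ∧ x ∣ n) ↔ (1 ≤ x ∧ x ≤ n ∧ PySem.Int.mod n x = 0) := by
    intro x
    constructor
    · rintro ⟨h1, h2⟩
      exact ⟨h1, Int.le_of_dvd (by omega) h2, (PySem.Int.mod_eq_zero_iff_dvd n x).2 h2⟩
    · rintro ⟨h1, _, h3⟩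
      exact ⟨h1, (PySem.Int.mod_eq_zero_iff_dvd n x).1 h3⟩
  obtain ⟨c', hc1, hc2, hc3, hc4, hc5, hc6⟩ := outerLoop_spec (n.toNat + 1) [1] n 2 1 (by omega) (by omega) (le_refl 2)
    one_pos
    (by
      intro x
      simp only [List.mem_singleton]
      constructor
      · rintro rfl; exact ⟨le_refl 1, dvd_refl 1⟩
      · rintro ⟨h1, h2⟩
        rcases Int.isUnit_iff.1 (isUnit_of_dvd_one h2) with h | h <;> omega)
    (List.nodup_singleton 1)
    (by
      intro q hq _ _
      have := hq.ne_one
      omega)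
    (by
      intro q hq _ hqd
      exact absurd (isUnit_of_dvd_one hqd) hq.not_unit)
  rw [one_mul] at hc2
  by_cases hsplit : 1 < (outerLoop (n.toNat + 1) [1] n 2).2
  · rw [if_pos hsplit]
    have hprime : Prime (outerLoop (n.toNat + 1) [1] n 2).2 ∧ ¬ (outerLoop (n.toNat + 1) [1] n 2).2 ∣ c' := by
      rcases hc6 with h | h
      · omega
      · exact h
    obtain ⟨hP, hnd2⟩ := hprime
    constructor
    · intro x
      rw [← hdiviff x, List.mem_append, List.mem_map]
      constructor
      · rintro (hx | ⟨d, hd, rfl⟩)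
        · obtain ⟨h1, h2⟩ := (hc3 x).1 hx
          exact ⟨h1, h2.mul_right _ |>.trans (dvd_of_eq hc2)⟩
        · obtain ⟨h1, h2⟩ := (hc3 d).1 hd
          refine ⟨by nlinarith, ?_⟩
          have hmm := mul_dvd_mul h2 (dvd_refl ((outerLoop (n.toNat + 1) [1] n 2).2))
          rwa [hc2] at hmm
      · rintro ⟨h1, h2⟩
        have h2' : x ∣ c' * (outerLoop (n.toNat + 1) [1] n 2).2 ^ 1 := by
          rw [pow_one, hc2]; exact h2
        obtain ⟨d, j, hd1, hd2, hj, rfl⟩ :=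
          dvd_mul_prime_pow c' (outerLoop (n.toNat + 1) [1] n 2).2 hP (by omega) hnd2 1 _ h1 h2'
        interval_cases j
        · left; rw [pow_zero, mul_one]; exact (hc3 d).2 ⟨hd1, hd2⟩
        · right; exact ⟨d, (hc3 d).2 ⟨hd1, hd2⟩, by rw [pow_one]⟩
    · apply List.Nodup.append hc4
      · exact hc4.map (fun d1 d2 h => mul_right_cancel₀ (by omega) h)
      · intro a ha hb
        obtain ⟨d, hd, rfl⟩ := List.mem_map.1 hb
        obtain ⟨h1, h2⟩ := (hc3 _).1 ha
        apply hnd2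
        exact (dvd_mul_left _ d).trans h2
  · rw [if_neg hsplit]
    have h1 : (outerLoop (n.toNat + 1) [1] n 2).2 = 1 := by omega
    rw [h1, mul_one] at hc2
    subst hc2
    exact ⟨fun x => (hc3 x).trans (hdiviff x), hc4⟩

-- ===== VERDICT (by name: the statement is the Claim_ definition above) =====
theorem solution_spec : Claim_equal_solution := by
  intro n k _ hpre
  obtain ⟨hn, hk⟩ := hpre
  unfold Spec_solution solution solution_alt
  dsimp only
  rw [foldl_eq_flatMap, List.nil_append]
  by_cases hn1 : 1 ≤ n
  · rw [sorted_pairs_eq_divList n hn1, if_pos hn1]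
    obtain ⟨hmem, hnd⟩ := alt_list_spec n hn1
    rw [sorted_eq_divList_of_mem_nodup n hn1 _ hmem hnd]
    by_cases hl : (((divList n).length : Int) < k)
    · rw [if_pos hl, if_neg (by omega)]
    · rw [if_neg hl, if_pos (by omega)]
  · have hn0 : n = 0 := by omega
    subst hn0
    have h1 : Int.sqrt (0 : Int) = 0 := by decide
    rw [h1, PySem.List.pyRange_one_eq_nil (by omega : (0:Int) + 1 ≤ 1)]
    rw [show List.flatMap (pairOf 0) [] = [] from rfl,
        show PySem.List.sorted ([] : List Int) (fun x => x) false = [] from rfl]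
    rw [if_neg (by omega : ¬ (1:Int) ≤ 0)]
    rw [show outerLoop (Int.toNat 0 + 1) [] 0 2 = ([], 0) from rfl]
    rw [if_neg (by norm_num : ¬ (1:Int) < 0)]
    rw [show PySem.List.sorted ([] : List Int) (fun x => x) false = [] from rfl]
    simp only [List.length_nil, Nat.cast_zero]
    rw [if_pos (by omega), if_neg (by omega)]
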